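-- pv_equiv track=rewrite | github.com/ourahmoune/WorkshopDDRM | docling_extractor.py | _post_process_markdown
-- ===== SOURCE A (Python) =====
-- def _post_process_markdown(content: str) -> str:
--     """Post-traite le Markdown pour améliorer sa qualité."""
--     lines = content.split("\n")
--     processed = []
--     prev_empty = False
--
--     for line in lines:
--         # Éviter les lignes vides multiples
--         if line.strip() == "":
--             if not prev_empty:
--                 processed.append(line)
--                 prev_empty = True
--         else:
--             processed.append(line)
--             prev_empty = False
--
--     # Normaliser les espaces autour des headers
--     result = []
--     for i, line in enumerate(processed):
--         if line.startswith("#"):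
--             # Ajouter une ligne vide avant le header
--             if i > 0 and processed[i - 1].strip() != "":
--                 result.append("")
--             result.append(line)
--         else:
--             result.append(line)
--
--     return "\n".join(result).strip() + "\n"
-- ===== SOURCE B (Python) =====
-- def _post_process_markdown(content: str) -> str:
--     """Single streaming pass: collapse blank runs and pad headers on the fly."""
--     result = []
--     prev_empty = False
--     prev_kept = None  # last line kept by the blank-collapsing logic
--     for line in content.split("\n"):
--         if line.strip() == "":
--             if not prev_empty:
--                 result.append(line)
--                 prev_empty = True
--                 prev_kept = line
--         else:
--             if line.startswith("#") and prev_kept is not None and prev_kept.strip() != "":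
--                 result.append("")
--             result.append(line)
--             prev_empty = False
--             prev_kept = line
--     return "\n".join(result).strip() + "\n"
-- ===== Notes on version B (the rewrite author's own statement) =====
-- stated objective: alternative
-- what changed: A's two sequential passes (collapse blank runs into a list, then re-scan it with enumerate and processed[i-1] lookups to pad headers) are fused into one streaming pass that carries prev_empty and the previously kept line, never materialising the intermediate list.
import Mathlib
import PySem

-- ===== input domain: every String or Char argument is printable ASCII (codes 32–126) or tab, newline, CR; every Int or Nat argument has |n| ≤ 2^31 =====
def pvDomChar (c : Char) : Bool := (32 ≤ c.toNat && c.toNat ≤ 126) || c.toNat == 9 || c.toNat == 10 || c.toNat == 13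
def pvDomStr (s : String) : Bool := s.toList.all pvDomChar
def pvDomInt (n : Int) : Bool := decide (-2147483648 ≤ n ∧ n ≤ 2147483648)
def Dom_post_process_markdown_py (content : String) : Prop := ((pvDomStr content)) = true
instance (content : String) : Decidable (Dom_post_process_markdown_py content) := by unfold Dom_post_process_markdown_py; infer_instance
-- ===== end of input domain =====

-- B fuses A's two sequential passes into one streaming pass (same output, same O(n) cost; objective: alternative decomposition).

-- ===== PORT A =====
-- first loop: collapse runs of blank lines, carrying (processed, prev_empty)
def ppCollapseStep (st : List String × Bool) (line : String) : List String × Bool :=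
  if PySem.Str.strip line = "" then
    if st.2 = false then (st.1 ++ [line], true) else st
  else (st.1 ++ [line], false)

-- second loop: 'for i, line in enumerate(processed)' inserting "" before headers
def ppHeaders (processed : List String) : List String :=
  (PySem.List.enumerate processed 0).foldl
    (fun result il =>
      if PySem.Str.startswith il.2 "#" then
        (if il.1 > 0 ∧ PySem.Str.strip (PySem.List.pyGetD processed (il.1 - 1) "") ≠ "" then
          result ++ [""] else result) ++ [il.2]
      else result ++ [il.2]) []

def post_process_markdown_py (content : String) : String :=
  let lines := (PySem.Str.split? content "\n").getD []
  let processed := (lines.foldl ppCollapseStep ([], false)).1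
  let result := ppHeaders processed
  PySem.Str.strip (PySem.Str.join "\n" result) ++ "\n"

-- ===== PORT B =====
-- one streaming step over (result, prev_empty, prev_kept)
def ppStreamStep (st : List String × Bool × Option String) (line : String) :
    List String × Bool × Option String :=
  if PySem.Str.strip line = "" then
    if st.2.1 = false then (st.1 ++ [line], true, some line) else st
  else
    ((if PySem.Str.startswith line "#" &&
          (match st.2.2 with
           | some p => decide (PySem.Str.strip p ≠ "")
           | none => false) then st.1 ++ [""] else st.1) ++ [line],
     false, some line)

def post_process_markdown_py_alt (content : String) : String :=
  let st := ((PySem.Str.split? content "\n").getD []).foldl ppStreamStep ([], false, none)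
  PySem.Str.strip (PySem.Str.join "\n" st.1) ++ "\n"

-- ===== PRECONDITION & SPEC =====
def Spec_post_process_markdown_py (content : String) (out : String) : Prop := out = post_process_markdown_py_alt content
instance (content : String) (out : String) : Decidable (Spec_post_process_markdown_py content out) := by unfold Spec_post_process_markdown_py; infer_instance

-- ===== CLAIM (what is proved, stated in full; the proofs are below) =====
def Claim_equal_post_process_markdown_py : Prop := ∀ (content : String), Dom_post_process_markdown_py content → Spec_post_process_markdown_py content (post_process_markdown_py content)

-- ===== LEMMAS AND PROOFS =====

-- a line whose strip is empty cannot start with '#'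
lemma strip_empty_not_hash (line : String) (h : PySem.Str.strip line = "") :
    PySem.Str.startswith line "#" = false := by
  by_contra hc
  have hsw : PySem.Str.startswith line "#" = true := by
    cases hb : PySem.Str.startswith line "#" with
    | false => exact absurd hb hc
    | true => rfl
  rw [PySem.Str.startswith_eq] at hsw
  have hpre := (PySem.Chars.startswith_iff _ _).mp hsw
  obtain ⟨t, ht⟩ := hpre
  have hl : line.toList = '#' :: t := by simpa using ht.symm
  have : (PySem.Str.strip line).toList = [] := by rw [h]; rfl
  rw [PySem.Str.toList_strip, hl] at this
  simp [PySem.Chars.strip, PySem.Chars.lstrip, PySem.Chars.rstrip, PySem.Chars.isspace] at this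
  have h35 := this '#' (Or.inr rfl)
  have e : ('#').toNat = 35 := rfl
  rw [e] at h35
  omega

-- what the header pass emits for one more line, given the previous kept line
def ppEmit (prev : Option String) (line : String) : List String :=
  (if PySem.Str.startswith line "#" &&
      (match prev with
       | some p => decide (PySem.Str.strip p ≠ "")
       | none => false) then [""] else []) ++ [line]

lemma pyGetD_append_last {P : List String} (l : String) (hne : P ≠ []) :
    PySem.List.pyGetD (P ++ [l]) ((P.length : Int) - 1) "" = P.getLast hne := by
  have hlen : 0 < P.length := List.length_pos_iff.mpr hne
  have h0 : (0 : Int) ≤ (P.length : Int) - 1 := by omega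
  have h1 : (P.length : Int) - 1 < ((P ++ [l]).length : Int) := by
    simp only [List.length_append, List.length_cons, List.length_nil]; omega
  rw [PySem.List.pyGetD_eq_getElem _ _ h0 h1]
  have hlt : ((P.length : Int) - 1).toNat < P.length := by omega
  rw [List.getElem_append_left hlt, List.getLast_eq_getElem hne]
  congr 1
  omega

lemma ppHeaders_append (P : List String) (l : String) :
    ppHeaders (P ++ [l]) = ppHeaders P ++ ppEmit P.getLast? l := by
  unfold ppHeaders
  rw [PySem.List.enumerate_append]
  rw [List.foldl_append]
  have hcongr : (PySem.List.enumerate P 0).foldl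
      (fun result il =>
        if PySem.Str.startswith il.2 "#" then
          (if il.1 > 0 ∧ PySem.Str.strip (PySem.List.pyGetD (P ++ [l]) (il.1 - 1) "") ≠ "" then
            result ++ [""] else result) ++ [il.2]
        else result ++ [il.2]) [] =
      (PySem.List.enumerate P 0).foldl
      (fun result il =>
        if PySem.Str.startswith il.2 "#" then
          (if il.1 > 0 ∧ PySem.Str.strip (PySem.List.pyGetD P (il.1 - 1) "") ≠ "" then
            result ++ [""] else result) ++ [il.2]
        else result ++ [il.2]) [] := by
    apply PySem.List.foldl_congr_mem
    intro acc x hx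
    obtain ⟨k, hk, rfl⟩ := (PySem.List.mem_enumerate_iff _ _ _).mp hx
    by_cases hpos : (0 : Int) + (k : Int) > 0
    · have hk1 : (0 : Int) + (k : Int) - 1 = ((k - 1 : Nat) : Int) := by omega
      have hb0 : (0 : Int) ≤ ((k - 1 : Nat) : Int) := by positivity
      have hb1 : ((k - 1 : Nat) : Int) < ((P ++ [l]).length : Int) := by
        simp only [List.length_append, List.length_cons, List.length_nil]; omega
      have hb1' : ((k - 1 : Nat) : Int) < (P.length : Int) := by omega
      rw [hk1, PySem.List.pyGetD_eq_getElem _ _ hb0 hb1,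
          PySem.List.pyGetD_eq_getElem _ _ hb0 hb1']
      have hlt : ((k - 1 : Nat) : Int).toNat < P.length := by omega
      rw [List.getElem_append_left]
    · have hc1 : ¬((0 : Int) + (k : Int) > 0 ∧
          PySem.Str.strip (PySem.List.pyGetD (P ++ [l]) ((0 : Int) + (k : Int) - 1) "") ≠ "") :=
        fun hh => hpos hh.1
      have hc2 : ¬((0 : Int) + (k : Int) > 0 ∧
          PySem.Str.strip (PySem.List.pyGetD P ((0 : Int) + (k : Int) - 1) "") ≠ "") :=
        fun hh => hpos hh.1
      rw [if_neg hc1, if_neg hc2]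
  rw [hcongr]
  simp only [PySem.List.enumerate, List.foldl_cons, List.foldl_nil]
  by_cases hne : P = []
  · subst hne
    simp [ppEmit]
  · have hlen : 0 < P.length := List.length_pos_iff.mpr hne
    have hidx : (0 : Int) + (P.length : Int) - 1 = (P.length : Int) - 1 := by omega
    rw [hidx, pyGetD_append_last l hne]
    have hlast : P.getLast? = some (P.getLast hne) := List.getLast?_eq_some_getLast hne
    have hpos : (0 : Int) + (P.length : Int) > 0 := by omega
    simp only [ppEmit, hlast]
    by_cases hsw : PySem.Chars.startswith l.toList ['#'] = true <;>
      by_cases hzs : PySem.Str.strip (P.getLast hne) = "" <;>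
        simp [hsw, hzs, hlen]

-- the streaming fold simulates (header pass ∘ collapse pass)
lemma stream_simulates (lines : List String) (P : List String) (pe : Bool) :
    lines.foldl ppStreamStep (ppHeaders P, pe, P.getLast?) =
      (ppHeaders (lines.foldl ppCollapseStep (P, pe)).1,
       (lines.foldl ppCollapseStep (P, pe)).2,
       (lines.foldl ppCollapseStep (P, pe)).1.getLast?) := by
  induction lines generalizing P pe with
  | nil => simp
  | cons line rest ih =>
    simp only [List.foldl_cons]
    by_cases hblank : PySem.Str.strip line = ""
    · by_cases hpe : pe = false
      · have hstream : ppStreamStep (ppHeaders P, pe, P.getLast?) line =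
            (ppHeaders P ++ [line], true, some line) := by
          simp [ppStreamStep, hblank, hpe]
        have hcoll : ppCollapseStep (P, pe) line = (P ++ [line], true) := by
          simp [ppCollapseStep, hblank, hpe]
        have hemit : ppEmit P.getLast? line = [line] := by
          simp only [ppEmit]
          rw [strip_empty_not_hash line hblank]
          simp
        have hH : ppHeaders (P ++ [line]) = ppHeaders P ++ [line] := by
          rw [ppHeaders_append, hemit]
        have hlast : (P ++ [line]).getLast? = some line := by simp
        rw [hstream, hcoll, ← hH, ← hlast]
        exact ih (P ++ [line]) true
      · have hpe' : pe = true := by cases pe <;> simp_all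
        have hstream : ppStreamStep (ppHeaders P, pe, P.getLast?) line =
            (ppHeaders P, pe, P.getLast?) := by
          simp [ppStreamStep, hblank, hpe']
        have hcoll : ppCollapseStep (P, pe) line = (P, pe) := by
          simp [ppCollapseStep, hblank, hpe']
        rw [hstream, hcoll]
        exact ih P pe
    · have hstream : ppStreamStep (ppHeaders P, pe, P.getLast?) line =
          (ppHeaders P ++ ppEmit P.getLast? line, false, some line) := by
        simp only [ppStreamStep, ppEmit, if_neg hblank]
        split_ifs <;> simp
      have hcoll : ppCollapseStep (P, pe) line = (P ++ [line], false) := by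
        simp [ppCollapseStep, hblank]
      have hlast : (P ++ [line]).getLast? = some line := by simp
      rw [hstream, hcoll, ← ppHeaders_append, ← hlast]
      exact ih (P ++ [line]) false

-- ===== VERDICT (by name: the statement is the Claim_ definition above) =====
theorem post_process_markdown_py_spec : Claim_equal_post_process_markdown_py := by
  intro content _
  unfold Spec_post_process_markdown_py post_process_markdown_py post_process_markdown_py_alt
  have h : (((PySem.Str.split? content "\n").getD []).foldl ppStreamStep ([], false, none)).1
      = ppHeaders (((PySem.Str.split? content "\n").getD []).foldl ppCollapseStep ([], false)).1 := by
    have hs := stream_simulates ((PySem.Str.split? content "\n").getD []) [] false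
    exact congrArg Prod.fst hs
  exact congrArg (fun r => PySem.Str.strip (PySem.Str.join "\n" r) ++ "\n") h.symm
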